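-- pv_equiv track=rewrite | github.com/Jeongmin39/Algorithm | 프로그래머스/2/258711. 도넛과 막대 그래프/도넛과 막대 그래프.py | dfs
-- ===== SOURCE A (Python) =====
-- def dfs(graph, start, visited):
--     node_count, edge_count = 0, 0
--     stack = [start]
--
--     while stack:
--         current = stack.pop()
--         if visited[current]:
--             continue
--
--         visited[current] = True
--         node_count += 1
--
--         for i in graph[current]:
--             edge_count += 1
--             if not visited[i]:
--                 stack.append(i)
--
--     return edge_count, node_count
-- ===== SOURCE B (Python) =====
-- def dfs(graph, start, visited):
--     # Recursive DFS instead of an explicit stack; mutates visited like the original.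
--     def go(u):
--         if visited[u]:
--             return 0, 0
--         visited[u] = True
--         e, n = len(graph[u]), 1
--         for i in graph[u]:
--             de, dn = go(i)
--             e += de
--             n += dn
--         return e, n
--     e, n = go(start)
--     return e, n
-- ===== Notes on version B (the rewrite author's own statement) =====
-- stated objective: alternative
-- what changed: Replaces the iterative explicit-stack/while-loop DFS by a recursive DFS over the adjacency lists (neighbors are visited in the opposite order; the proof shows the counts are traversal-order independent).
import Mathlib
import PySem

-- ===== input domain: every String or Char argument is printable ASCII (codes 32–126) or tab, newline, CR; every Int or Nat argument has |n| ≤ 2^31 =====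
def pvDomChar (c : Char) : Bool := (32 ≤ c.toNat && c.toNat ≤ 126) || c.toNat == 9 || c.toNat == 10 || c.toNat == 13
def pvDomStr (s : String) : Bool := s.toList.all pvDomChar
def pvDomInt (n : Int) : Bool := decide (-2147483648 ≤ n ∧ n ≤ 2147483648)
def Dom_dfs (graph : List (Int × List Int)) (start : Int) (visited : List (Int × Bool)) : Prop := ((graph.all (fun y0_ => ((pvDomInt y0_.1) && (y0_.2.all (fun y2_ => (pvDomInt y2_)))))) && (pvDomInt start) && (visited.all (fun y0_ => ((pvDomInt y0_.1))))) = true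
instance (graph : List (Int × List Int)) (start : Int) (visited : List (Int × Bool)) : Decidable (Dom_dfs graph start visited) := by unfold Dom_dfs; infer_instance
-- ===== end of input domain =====

-- B replaces the explicit-stack/while-loop DFS by a recursive DFS (opposite neighbor order,
-- same counts); both Pythons mutate `visited` identically, the theorems are about the return value.

-- Shared dict primitives (Python dict lookup = first match; assignment = overwrite in place, append if absent).
def vGet? (vis : List (Int × Bool)) (k : Int) : Option Bool :=
  match vis with
  | [] => none
  | (k', b) :: t => if k' = k then some b else vGet? t k

-- visited[k] = True
def vSet (vis : List (Int × Bool)) (k : Int) : List (Int × Bool) :=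
  match vis with
  | [] => [(k, true)]
  | (k', b) :: t => if k' = k then (k', true) :: t else (k', b) :: vSet t k

def gGet? (graph : List (Int × List Int)) (k : Int) : Option (List Int) :=
  match graph with
  | [] => none
  | (k', a) :: t => if k' = k then some a else gGet? t k

-- number of entries still marked False (termination measure / fuel bound)
def fc (vis : List (Int × Bool)) : Nat := (vis.filter (fun p => !p.2)).length

theorem fc_vSet_lt (vis : List (Int × Bool)) (u : Int) (h : vGet? vis u = some false) :
    fc (vSet vis u) < fc vis := by
  induction vis with
  | nil => simp [vGet?] at h
  | cons p t ih =>
    obtain ⟨k', b⟩ := p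
    by_cases hk : k' = u
    · subst hk
      simp [vGet?] at h
      subst h
      simp [vSet, fc]
    · simp [vGet?, hk] at h
      have := ih h
      cases b <;> simp [vSet, hk, fc] at this ⊢ <;> omega

-- ===== PORT A =====
-- while-loop of A; state (node_count, edge_count, stack, visited); stack top = list head.
-- A missing key (a KeyError in Python, excluded by Pre_dfs) is skipped / treated as no neighbors.
def dfsLoop (graph : List (Int × List Int)) (visited : List (Int × Bool))
    (stack : List Int) (nodeCount edgeCount : Int) : Int × Int × List (Int × Bool) :=
  match stack with
  | [] => (edgeCount, nodeCount, visited)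
  | current :: rest =>
    if h : (vGet? visited current).getD true then
      dfsLoop graph visited rest nodeCount edgeCount
    else
      let visited' := vSet visited current
      let r := ((gGet? graph current).getD []).foldl
        (fun (p : Int × List Int) i =>
          (p.1 + 1, if (vGet? visited' i).getD false then p.2 else i :: p.2))
        (edgeCount, rest)
      dfsLoop graph visited' r.2 (nodeCount + 1) r.1
termination_by (fc visited, stack.length)
decreasing_by
  · exact Prod.Lex.right _ (by simp)
  · apply Prod.Lex.left
    apply fc_vSet_lt
    cases hv : vGet? visited current with
    | none => simp [hv] at h
    | some b => cases b <;> simp [hv] at h ⊢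

def dfs (graph : List (Int × List Int)) (start : Int) (visited : List (Int × Bool)) : Int × Int :=
  let r := dfsLoop graph visited [start] 0 0
  (r.1, r.2.1)

-- ===== PORT B =====
-- go(u) of Source B, generalized to a pending list (head = next call); the sibling for-loop is the
-- rest of the list. fuel is only a totality guard: it starts at fc visited and never runs out
-- (runB_fuel below), each unvisited node consumes one False entry.
def runB (graph : List (Int × List Int)) (fuel : Nat) (pending : List Int)
    (visited : List (Int × Bool)) : Int × Int × List (Int × Bool) :=
  match pending with
  | [] => (0, 0, visited)
  | u :: rest =>
    if (vGet? visited u).getD true then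
      runB graph fuel rest visited
    else
      match fuel with
      | 0 => (0, 0, visited)
      | f + 1 =>
        let visited' := vSet visited u
        let adj := (gGet? graph u).getD []
        let r1 := runB graph f adj visited'
        let r2 := runB graph f rest r1.2.2
        ((adj.length : Int) + r1.1 + r2.1, 1 + r1.2.1 + r2.2.1, r2.2.2)
termination_by (fuel, pending.length)
decreasing_by
  · exact Prod.Lex.right _ (by simp)
  · exact Prod.Lex.left _ _ (by omega)
  · exact Prod.Lex.left _ _ (by omega)

def dfs_alt (graph : List (Int × List Int)) (start : Int) (visited : List (Int × Bool)) : Int × Int :=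
  let r := runB graph (fc visited) [start] visited
  (r.1, r.2.1)

-- ===== PRECONDITION & SPEC =====
-- The "touched" closure: the set of nodes on which Python A evaluates `visited[·]` — start,
-- plus (repeatedly) all neighbors of every touched node that is initially unvisited and has an
-- adjacency list. One expansion round; iterated (one new closure level needs one more initially
-- False entry, so visited.length + 1 rounds reach the fixpoint).
def touchStep (graph : List (Int × List Int)) (visited : List (Int × Bool)) (S : List Int) : List Int :=
  S.foldl (fun acc u =>
    if vGet? visited u = some false then
      ((gGet? graph u).getD []).foldl (fun a i => if i ∈ a then a else a ++ [i]) acc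
    else acc) S

def touched (graph : List (Int × List Int)) (start : Int) (visited : List (Int × Bool)) : List Int :=
  (touchStep graph visited)^[visited.length + 1] [start]

-- Pre_dfs admits EXACTLY the inputs on which Python A returns: it excludes precisely the
-- KeyError inputs (a touched node missing from visited, or a touched initially-unvisited node
-- missing from graph); Python B raises on exactly the same inputs.
def Pre_dfs (graph : List (Int × List Int)) (start : Int) (visited : List (Int × Bool)) : Prop :=
  ∀ u ∈ touched graph start visited,
    (vGet? visited u).isSome = true ∧
    (vGet? visited u = some false → (gGet? graph u).isSome = true)
instance (graph : List (Int × List Int)) (start : Int) (visited : List (Int × Bool)) : Decidable (Pre_dfs graph start visited) := by unfold Pre_dfs; infer_instance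

def pvWitness_dfs : (List (Int × List Int)) × Int × (List (Int × Bool)) :=
  ([(0, [1]), (1, [0])], 0, [(0, false), (1, false)])

def Spec_dfs (graph : List (Int × List Int)) (start : Int) (visited : List (Int × Bool)) (out : Int × Int) : Prop := out = dfs_alt graph start visited
instance (graph : List (Int × List Int)) (start : Int) (visited : List (Int × Bool)) (out : Int × Int) : Decidable (Spec_dfs graph start visited out) := by unfold Spec_dfs; infer_instance

-- ===== CLAIM (what is proved, stated in full; the proofs are below) =====
def Claim_equal_dfs : Prop := ∀ (graph : List (Int × List Int)) (start : Int) (visited : List (Int × Bool)), Dom_dfs graph start visited → Pre_dfs graph start visited → Spec_dfs graph start visited (dfs graph start visited)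

-- ===== LEMMAS AND PROOFS =====

-- ----- proof helpers: properties of vGet?/vSet -----

theorem vGet?_vSet_self (vis : List (Int × Bool)) (u : Int) :
    vGet? (vSet vis u) u = some true := by
  induction vis with
  | nil => simp [vSet, vGet?]
  | cons p t ih =>
    obtain ⟨k', b⟩ := p
    by_cases hk : k' = u <;> simp [vSet, vGet?, hk, ih]

theorem vGet?_vSet_ne (vis : List (Int × Bool)) (u x : Int) (h : x ≠ u) :
    vGet? (vSet vis u) x = vGet? vis x := by
  induction vis with
  | nil =>
    have : ¬ u = x := fun hh => h hh.symm
    simp [vSet, vGet?, this]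
  | cons p t ih =>
    obtain ⟨k', b⟩ := p
    by_cases hk : k' = u
    · subst hk
      have hkx : ¬ k' = x := fun hh => h (hh ▸ rfl)
      simp [vSet, vGet?, hkx]
    · simp [vSet, vGet?, hk, ih]

theorem vSet_comm (vis : List (Int × Bool)) (x y : Int) (hxy : x ≠ y)
    (hx : (vGet? vis x).isSome = true) :
    vSet (vSet vis x) y = vSet (vSet vis y) x := by
  induction vis with
  | nil => simp [vGet?] at hx
  | cons p t ih =>
    obtain ⟨k', b⟩ := p
    by_cases hkx : k' = x
    · subst hkx
      simp [vSet, hxy, fun h : k' = y => hxy h]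
    · by_cases hky : k' = y
      · subst hky
        simp [vSet, hkx, fun h : k' = x => hkx h]
      · simp [vGet?, hkx] at hx
        simp [vSet, hkx, hky, ih hx]

theorem fc_pos (vis : List (Int × Bool)) (u : Int) (h : vGet? vis u = some false) :
    1 ≤ fc vis := by
  induction vis with
  | nil => simp [vGet?] at h
  | cons p t ih =>
    obtain ⟨k', b⟩ := p
    by_cases hk : k' = u
    · subst hk; simp [vGet?] at h; subst h; simp [fc]
    · simp [vGet?, hk] at h
      have := ih h
      cases b <;> simp [fc] at this ⊢ <;> omega

theorem fc_vSet_eq (vis : List (Int × Bool)) (u : Int) (h : vGet? vis u = some false) :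
    fc (vSet vis u) + 1 = fc vis := by
  induction vis with
  | nil => simp [vGet?] at h
  | cons p t ih =>
    obtain ⟨k', b⟩ := p
    by_cases hk : k' = u
    · subst hk; simp [vGet?] at h; subst h; simp [vSet, fc]
    · simp [vGet?, hk] at h
      have hrec := ih h
      have hstep : vSet ((k', b) :: t) u = (k', b) :: vSet t u := by simp [vSet, hk]
      rw [hstep]
      cases b <;> simp [fc] at hrec ⊢ <;> omega

theorem fc_vSet_le (vis : List (Int × Bool)) (u : Int) :
    fc (vSet vis u) ≤ fc vis := by
  induction vis with
  | nil => simp [vSet, fc]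
  | cons p t ih =>
    obtain ⟨k', b⟩ := p
    by_cases hk : k' = u
    · subst hk; cases b <;> simp [vSet, fc]
    · have hstep : vSet ((k', b) :: t) u = (k', b) :: vSet t u := by simp [vSet, hk]
      rw [hstep]
      cases b <;> simp [fc] at ih ⊢ <;> omega

theorem vSet_nfalse_pres (vis : List (Int × Bool)) (u x : Int)
    (h : (vGet? vis x).getD true = true) : (vGet? (vSet vis u) x).getD true = true := by
  by_cases hx : x = u
  · subst hx; rw [vGet?_vSet_self]; rfl
  · rw [vGet?_vSet_ne vis u x hx]; exact h

theorem getD_true_eq_false {o : Option Bool} (h : ¬ (o.getD true = true)) : o = some false := by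
  cases o with
  | none => simp at h
  | some b => cases b <;> simp_all

-- ----- unfolding equations for runB -----

theorem runB_nil (graph : List (Int × List Int)) (fuel : Nat) (vis : List (Int × Bool)) :
    runB graph fuel [] vis = (0, 0, vis) := by
  rw [runB.eq_def]

theorem runB_skip (graph : List (Int × List Int)) (fuel : Nat) (u : Int) (rest : List Int)
    (vis : List (Int × Bool)) (h : (vGet? vis u).getD true = true) :
    runB graph fuel (u :: rest) vis = runB graph fuel rest vis := by
  rw [runB.eq_def]; simp [h]

theorem runB_visit (graph : List (Int × List Int)) (f : Nat) (u : Int) (rest : List Int)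
    (vis : List (Int × Bool)) (h : vGet? vis u = some false) :
    runB graph (f + 1) (u :: rest) vis =
      (let adj := (gGet? graph u).getD []
       let r1 := runB graph f adj (vSet vis u)
       let r2 := runB graph f rest r1.2.2
       ((adj.length : Int) + r1.1 + r2.1, 1 + r1.2.1 + r2.2.1, r2.2.2)) := by
  rw [runB.eq_def]; simp [h]

theorem runB_mono (graph : List (Int × List Int)) (fuel : Nat) (pending : List Int)
    (vis : List (Int × Bool)) : fc (runB graph fuel pending vis).2.2 ≤ fc vis := by
  fun_induction runB with
  | case1 => simp
  | case2 => simpa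
  | case3 => simp
  | case4 vis u rest hvis f vis' adj r1 r2 ih3 ih2 ih1 =>
    simp only
    calc fc r2.2.2 ≤ fc r1.2.2 := ih1
    _ ≤ fc (vSet vis u) := ih3
    _ ≤ fc vis := fc_vSet_le vis u

theorem runB_nfalse_pres (graph : List (Int × List Int)) (fuel : Nat) (pending : List Int)
    (vis : List (Int × Bool)) (x : Int) :
    (vGet? vis x).getD true = true → (vGet? (runB graph fuel pending vis).2.2 x).getD true = true := by
  fun_induction runB with
  | case1 => intro h; simpa
  | case2 fuel vis u rest hvis ih => intro h; exact ih h
  | case3 => intro h; simpa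
  | case4 vis u rest hvis f vis' adj r1 r2 ih3 ih2 ih1 =>
    intro h
    simp only
    exact ih1 (ih3 (vSet_nfalse_pres vis u x h))

theorem runB_fuel (graph : List (Int × List Int)) (k : Nat) :
    ∀ (vis : List (Int × Bool)), fc vis ≤ k →
    ∀ (pending : List Int) (f g : Nat), fc vis ≤ f → fc vis ≤ g →
    runB graph f pending vis = runB graph g pending vis := by
  induction k using Nat.strong_induction_on with
  | _ k ih =>
    intro vis hk pending
    induction pending with
    | nil => intro f g _ _; rw [runB_nil, runB_nil]
    | cons u rest ihp =>
      intro f g hf hg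
      by_cases hv : (vGet? vis u).getD true = true
      · rw [runB_skip _ _ _ _ _ hv, runB_skip _ _ _ _ _ hv]
        exact ihp f g hf hg
      · have hu := getD_true_eq_false hv
        have h1 := fc_pos vis u hu
        have hfc := fc_vSet_eq vis u hu
        obtain ⟨f', rfl⟩ : ∃ f', f = f' + 1 := ⟨f - 1, by omega⟩
        obtain ⟨g', rfl⟩ : ∃ g', g = g' + 1 := ⟨g - 1, by omega⟩
        rw [runB_visit _ _ _ _ _ hu, runB_visit _ _ _ _ _ hu]
        simp only
        have hlt : fc (vSet vis u) < k := by omega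
        have hadj : runB graph f' ((gGet? graph u).getD []) (vSet vis u)
            = runB graph g' ((gGet? graph u).getD []) (vSet vis u) :=
          ih _ hlt (vSet vis u) le_rfl _ f' g' (by omega) (by omega)
        rw [hadj]
        have hm := runB_mono graph g' ((gGet? graph u).getD []) (vSet vis u)
        have hrest : runB graph f' rest (runB graph g' ((gGet? graph u).getD []) (vSet vis u)).2.2
            = runB graph g' rest (runB graph g' ((gGet? graph u).getD []) (vSet vis u)).2.2 :=
          ih _ hlt _ hm _ f' g' (by omega) (by omega)
        rw [hrest]

theorem runB_append (graph : List (Int × List Int)) (l1 : List Int) :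
    ∀ (l2 : List Int) (vis : List (Int × Bool)) (f : Nat), fc vis ≤ f →
    runB graph f (l1 ++ l2) vis =
      (let r1 := runB graph f l1 vis
       let r2 := runB graph f l2 r1.2.2
       (r1.1 + r2.1, r1.2.1 + r2.2.1, r2.2.2)) := by
  induction l1 with
  | nil =>
    intro l2 vis f _
    simp only [List.nil_append, runB_nil]
    rcases hr : runB graph f l2 vis with ⟨e, n, v⟩
    simp
  | cons u l1' ih =>
    intro l2 vis f hf
    by_cases hv : (vGet? vis u).getD true = true
    · rw [List.cons_append, runB_skip _ _ _ _ _ hv, runB_skip _ _ _ _ _ hv]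
      exact ih l2 vis f hf
    · have hu := getD_true_eq_false hv
      have h1 := fc_pos vis u hu
      have hfc := fc_vSet_eq vis u hu
      obtain ⟨f', rfl⟩ : ∃ f', f = f' + 1 := ⟨f - 1, by omega⟩
      rw [List.cons_append, runB_visit _ _ _ _ _ hu, runB_visit _ _ _ _ _ hu]
      simp only
      have hm1 := runB_mono graph f' ((gGet? graph u).getD []) (vSet vis u)
      have hsplit := ih l2 (runB graph f' ((gGet? graph u).getD []) (vSet vis u)).2.2 f' (by omega)
      rw [hsplit]
      simp only
      have hm2 := runB_mono graph f' l1' (runB graph f' ((gGet? graph u).getD []) (vSet vis u)).2.2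
      have hfuel := runB_fuel graph (fc vis) _ (le_trans (le_trans hm2 hm1) (by omega)) l2 (f' + 1) f'
        (le_trans (le_trans hm2 hm1) (by omega)) (le_trans (le_trans hm2 hm1) (by omega))
      rw [hfuel]
      rcases runB graph f' ((gGet? graph u).getD []) (vSet vis u) with ⟨e1, n1, v1⟩
      simp only
      rcases runB graph f' l1' v1 with ⟨e2, n2, v2⟩
      simp only
      rcases runB graph f' l2 v2 with ⟨e3, n3, v3⟩
      simp only
      refine Prod.ext ?_ (Prod.ext ?_ rfl) <;> simp <;> ring

theorem runB_visit_fused (graph : List (Int × List Int)) (f : Nat) (u : Int) (rest : List Int)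
    (vis : List (Int × Bool)) (hu : vGet? vis u = some false) (hf : fc vis ≤ f + 1) :
    runB graph (f + 1) (u :: rest) vis =
      (let adj := (gGet? graph u).getD []
       let t := runB graph f (adj ++ rest) (vSet vis u)
       ((adj.length : Int) + t.1, 1 + t.2.1, t.2.2)) := by
  have happ := runB_append graph ((gGet? graph u).getD []) rest (vSet vis u) f
    (by have := fc_vSet_eq vis u hu; omega)
  rw [runB_visit _ _ _ _ _ hu]
  simp only [happ]
  rcases runB graph f ((gGet? graph u).getD []) (vSet vis u) with ⟨e1, n1, v1⟩
  simp only
  rcases runB graph f rest v1 with ⟨e2, n2, v2⟩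
  simp only
  refine Prod.ext ?_ (Prod.ext ?_ rfl) <;> simp <;> ring

theorem runB_perm (graph : List (Int × List Int)) (k : Nat) :
    ∀ (l l' : List Int), l.Perm l' →
    ∀ (vis : List (Int × Bool)), fc vis ≤ k → ∀ (f : Nat), fc vis ≤ f →
    runB graph f l vis = runB graph f l' vis := by
  induction k using Nat.strong_induction_on with
  | _ k ih =>
    intro l l' hp
    induction hp with
    | nil => intro vis hk f hf; rfl
    | cons x hp' ihp =>
      intro vis hk f hf
      by_cases hv : (vGet? vis x).getD true = true
      · rw [runB_skip _ _ _ _ _ hv, runB_skip _ _ _ _ _ hv]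
        exact ihp vis hk f hf
      · have hu := getD_true_eq_false hv
        have h1 := fc_pos vis x hu
        have hfc := fc_vSet_eq vis x hu
        obtain ⟨f', rfl⟩ : ∃ f', f = f' + 1 := ⟨f - 1, by omega⟩
        rw [runB_visit _ _ _ _ _ hu, runB_visit _ _ _ _ _ hu]
        simp only
        have hm := runB_mono graph f' ((gGet? graph x).getD []) (vSet vis x)
        have hrest := ihp (runB graph f' ((gGet? graph x).getD []) (vSet vis x)).2.2
          (by omega) f' (by omega)
        rw [hrest]
    | swap x y l0 =>
      intro vis hk f hf
      by_cases hx : (vGet? vis x).getD true = true <;>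
        by_cases hy : (vGet? vis y).getD true = true
      · rw [runB_skip _ _ _ _ _ hy, runB_skip _ _ _ _ _ hx,
          runB_skip _ _ _ _ _ hx, runB_skip _ _ _ _ _ hy]
      · have huy := getD_true_eq_false hy
        have h1 := fc_pos vis y huy
        have hfc := fc_vSet_eq vis y huy
        obtain ⟨f', rfl⟩ : ∃ f', f = f' + 1 := ⟨f - 1, by omega⟩
        rw [runB_skip _ _ _ _ _ hx, runB_visit _ _ _ _ _ huy, runB_visit _ _ _ _ _ huy]
        simp only
        have hx1 : (vGet? (runB graph f' ((gGet? graph y).getD []) (vSet vis y)).2.2 x).getD true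
            = true :=
          runB_nfalse_pres _ _ _ _ _ (vSet_nfalse_pres vis y x hx)
        rw [runB_skip _ _ _ _ _ hx1]
      · have hux := getD_true_eq_false hx
        have h1 := fc_pos vis x hux
        have hfc := fc_vSet_eq vis x hux
        obtain ⟨f', rfl⟩ : ∃ f', f = f' + 1 := ⟨f - 1, by omega⟩
        rw [runB_skip _ _ _ _ _ hy, runB_visit _ _ _ _ _ hux, runB_visit _ _ _ _ _ hux]
        simp only
        have hy1 : (vGet? (runB graph f' ((gGet? graph x).getD []) (vSet vis x)).2.2 y).getD true
            = true :=
          runB_nfalse_pres _ _ _ _ _ (vSet_nfalse_pres vis x y hy)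
        rw [runB_skip _ _ _ _ _ hy1]
      · have hux := getD_true_eq_false hx
        have huy := getD_true_eq_false hy
        by_cases hxy : x = y
        · subst hxy; rfl
        · have hfcy := fc_vSet_eq vis y huy
          have hxy' : vGet? (vSet vis y) x = some false := by
            rw [vGet?_vSet_ne vis y x hxy]; exact hux
          have hyx' : vGet? (vSet vis x) y = some false := by
            rw [vGet?_vSet_ne vis x y (fun h => hxy h.symm)]; exact huy
          have hfcx := fc_vSet_eq vis x hux
          have hfcyx := fc_vSet_eq (vSet vis y) x hxy'
          have hfcxy := fc_vSet_eq (vSet vis x) y hyx'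
          have h2 : 2 ≤ fc vis := by omega
          obtain ⟨f'', rfl⟩ : ∃ f'', f = f'' + 1 + 1 := ⟨f - 2, by omega⟩
          rw [runB_visit_fused graph (f'' + 1) y _ vis huy (by omega),
            runB_visit_fused graph (f'' + 1) x _ vis hux (by omega)]
          simp only
          rw [ih (fc (vSet vis y)) (by omega) _ _ List.perm_middle (vSet vis y) le_rfl
            (f'' + 1) (by omega)]
          rw [ih (fc (vSet vis x)) (by omega) _ _ List.perm_middle (vSet vis x) le_rfl
            (f'' + 1) (by omega)]
          rw [runB_visit_fused graph f'' x _ (vSet vis y) hxy' (by omega),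
            runB_visit_fused graph f'' y _ (vSet vis x) hyx' (by omega)]
          simp only
          rw [vSet_comm vis y x (fun h => hxy h.symm) (by rw [huy]; rfl)]
          have hperm : ((gGet? graph x).getD [] ++ ((gGet? graph y).getD [] ++ l0)).Perm
              ((gGet? graph y).getD [] ++ ((gGet? graph x).getD [] ++ l0)) :=
            List.perm_append_comm_assoc _ _ _
          rw [ih (fc (vSet (vSet vis x) y)) (by omega) _ _ hperm _ le_rfl f'' (by omega)]
          rcases runB graph f''
            ((gGet? graph y).getD [] ++ ((gGet? graph x).getD [] ++ l0))
            (vSet (vSet vis x) y) with ⟨e1, n1, v1⟩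
          simp only
          refine Prod.ext ?_ (Prod.ext ?_ rfl) <;> simp <;> ring
    | trans hp1 hp2 ih1 ih2 =>
      intro vis hk f hf
      exact (ih1 vis hk f hf).trans (ih2 vis hk f hf)

theorem runB_filter (graph : List (Int × List Int)) (p : Int → Bool) (l : List Int) :
    ∀ (rest : List Int) (vis : List (Int × Bool)) (f : Nat), fc vis ≤ f →
    (∀ x ∈ l, p x = true → (vGet? vis x).getD true = true) →
    runB graph f (l.filter (fun i => !p i) ++ rest) vis = runB graph f (l ++ rest) vis := by
  induction l with
  | nil => intro rest vis f _ _; rfl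
  | cons x l' ih =>
    intro rest vis f hf h
    by_cases hp : p x = true
    · have hskip : (vGet? vis x).getD true = true := h x (by simp) hp
      rw [List.filter_cons_of_neg (by simp [hp]), List.cons_append,
        runB_skip _ _ _ _ _ hskip]
      exact ih rest vis f hf (fun z hz hpz => h z (by simp [hz]) hpz)
    · rw [List.filter_cons_of_pos (by simp [hp]), List.cons_append, List.cons_append]
      by_cases hv : (vGet? vis x).getD true = true
      · rw [runB_skip _ _ _ _ _ hv, runB_skip _ _ _ _ _ hv]
        exact ih rest vis f hf (fun z hz hpz => h z (by simp [hz]) hpz)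
      · have hu := getD_true_eq_false hv
        have h1 := fc_pos vis x hu
        have hfc := fc_vSet_eq vis x hu
        obtain ⟨f', rfl⟩ : ∃ f', f = f' + 1 := ⟨f - 1, by omega⟩
        rw [runB_visit _ _ _ _ _ hu, runB_visit _ _ _ _ _ hu]
        simp only
        have hm := runB_mono graph f' ((gGet? graph x).getD []) (vSet vis x)
        have hrec := ih rest (runB graph f' ((gGet? graph x).getD []) (vSet vis x)).2.2 f'
          (by omega)
          (fun z hz hpz =>
            runB_nfalse_pres _ _ _ _ _ (vSet_nfalse_pres _ _ _ (h z (by simp [hz]) hpz)))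
        rw [hrec]

theorem foldA (c : Int → Bool) (adj : List Int) :
    ∀ (ec : Int) (st : List Int),
    adj.foldl (fun (p : Int × List Int) i => (p.1 + 1, if c i then p.2 else i :: p.2)) (ec, st)
      = (ec + adj.length, (adj.filter (fun i => !c i)).reverse ++ st) := by
  induction adj with
  | nil => intro ec st; simp
  | cons x l ih =>
    intro ec st
    simp only [List.foldl_cons]
    by_cases hc : c x = true
    · rw [if_pos hc, ih, List.filter_cons_of_neg (by simp [hc])]
      refine Prod.ext ?_ rfl
      simp only [List.length_cons]
      push_cast
      ring
    · rw [if_neg hc, ih, List.filter_cons_of_pos (by simp [hc])]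
      refine Prod.ext ?_ ?_
      · simp only [List.length_cons]; push_cast; ring
      · simp

theorem dfsLoop_nil (graph : List (Int × List Int)) (vis : List (Int × Bool)) (nc ec : Int) :
    dfsLoop graph vis [] nc ec = (ec, nc, vis) := by
  rw [dfsLoop.eq_def]

theorem dfsLoop_skip (graph : List (Int × List Int)) (vis : List (Int × Bool)) (u : Int)
    (rest : List Int) (nc ec : Int) (h : (vGet? vis u).getD true = true) :
    dfsLoop graph vis (u :: rest) nc ec = dfsLoop graph vis rest nc ec := by
  rw [dfsLoop.eq_def]; simp [h]

theorem dfsLoop_visit (graph : List (Int × List Int)) (vis : List (Int × Bool)) (u : Int)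
    (rest : List Int) (nc ec : Int) (h : vGet? vis u = some false) :
    dfsLoop graph vis (u :: rest) nc ec =
      dfsLoop graph (vSet vis u)
        ((((gGet? graph u).getD []).filter
            (fun i => !(vGet? (vSet vis u) i).getD false)).reverse ++ rest)
        (nc + 1) (ec + ((gGet? graph u).getD []).length) := by
  rw [dfsLoop.eq_def]
  simp [h, foldA]

theorem simLoop (graph : List (Int × List Int)) (k : Nat) :
    ∀ (vis : List (Int × Bool)), fc vis ≤ k →
    ∀ (stack : List Int) (nc ec : Int) (f : Nat), fc vis ≤ f →
    dfsLoop graph vis stack nc ec =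
      (let r := runB graph f stack vis
       (ec + r.1, nc + r.2.1, r.2.2)) := by
  induction k using Nat.strong_induction_on with
  | _ k ih =>
    intro vis hk stack
    induction stack with
    | nil => intro nc ec f hf; rw [dfsLoop_nil, runB_nil]; simp
    | cons u rest ihs =>
      intro nc ec f hf
      by_cases hv : (vGet? vis u).getD true = true
      · rw [dfsLoop_skip _ _ _ _ _ _ hv, runB_skip _ _ _ _ _ hv]
        exact ihs nc ec f hf
      · have hu := getD_true_eq_false hv
        have h1 := fc_pos vis u hu
        have hfc := fc_vSet_eq vis u hu
        obtain ⟨f', rfl⟩ : ∃ f', f = f' + 1 := ⟨f - 1, by omega⟩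
        rw [dfsLoop_visit _ _ _ _ _ _ hu,
          ih (fc (vSet vis u)) (by omega) (vSet vis u) le_rfl _ _ _ f' (by omega)]
        have hperm := runB_perm graph (fc (vSet vis u))
          ((((gGet? graph u).getD []).filter
              (fun i => !(vGet? (vSet vis u) i).getD false)).reverse ++ rest)
          ((((gGet? graph u).getD []).filter
              (fun i => !(vGet? (vSet vis u) i).getD false)) ++ rest)
          ((List.reverse_perm _).append_right rest)
          (vSet vis u) le_rfl f' (by omega)
        rw [hperm]
        have hfilt := runB_filter graph (fun i => (vGet? (vSet vis u) i).getD false)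
          ((gGet? graph u).getD []) rest (vSet vis u) f' (by omega)
          (fun x _ hpx => by
            cases ho : vGet? (vSet vis u) x with
            | none => simp [ho] at hpx
            | some b => cases b with
              | false => simp [ho] at hpx
              | true => simp)
        rw [hfilt]
        rw [runB_visit_fused graph f' u rest vis hu (by omega)]
        simp only
        rcases runB graph f' ((gGet? graph u).getD [] ++ rest) (vSet vis u) with ⟨e1, n1, v1⟩
        simp only
        refine Prod.ext ?_ (Prod.ext ?_ rfl) <;> simp <;> ring

-- ===== VERDICT (by name: the statement is the Claim_ definition above) =====
theorem dfs_spec : Claim_equal_dfs := by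
  intro graph start visited _ _
  unfold Spec_dfs dfs dfs_alt
  have h := simLoop graph (fc visited) visited le_rfl [start] 0 0 (fc visited) le_rfl
  rw [h]
  simp
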